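-- pv_equiv track=rewrite | github.com/lukisch/DokuReader | DokuReader.py | _split_dnd_paths
-- ===== SOURCE A (Python) =====
-- def _split_dnd_paths(data: str):
--     # Formate wie {C:\Pfad mit Leerzeichen\file.pdf} /home/user/x.pdf ...
--     res = []
--     cur = []
--     in_brace = False
--     for ch in data:
--         if ch == "{":
--             in_brace = True
--             cur = []
--         elif ch == "}":
--             in_brace = False
--             res.append("".join(cur))
--             cur = []
--         elif ch == " " and not in_brace:
--             if cur:
--                 res.append("".join(cur))
--                 cur = []
--         else:
--             cur.append(ch)
--     if cur:
--         res.append("".join(cur))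
--     return [p.strip() for p in res if p.strip()]
-- ===== SOURCE B (Python) =====
-- def _split_dnd_paths(data: str):
--     # Position-based tokenizer: a '{' opens a group running to the next '}'
--     # (or to the end of the string), spaces and stray '}' separate bare words.
--     paths, i, n = [], 0, len(data)
--     while i < n:
--         if data[i] == '{':
--             j = data.find('}', i + 1)
--             if j == -1:
--                 j = n
--             paths.append(data[i + 1:j])
--             i = j + 1
--         elif data[i] in ' }':
--             i += 1
--         else:
--             j = i
--             while j < n and data[j] not in ' {}':
--                 j += 1
--             paths.append(data[i:j])
--             i = j
--     return [p for p in map(str.strip, paths) if p]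
-- ===== Notes on version B (the rewrite author's own statement) =====
-- stated objective: alternative
-- what changed: Replaces A's char-by-char state machine (in-brace flag plus a growing char buffer) with a position-based tokenizer that cuts each brace group out with one find of the closing brace and each bare word with one bounded scan.
-- intended difference: On inputs where an opening brace does not start a fresh token (it is glued to preceding visible text, or occurs again inside an unclosed brace group), A's state machine silently discards the buffered text before that brace and returns only what follows it; B keeps that text (the preceding word as its own token, resp. the brace body taken literally up to the first closing brace), which is the intended reading since drag-and-drop data should never be silently dropped. — e.g. on _split_dnd_paths("a{b}"): A returns ["b"], B returns ["a", "b"]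
import Mathlib
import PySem

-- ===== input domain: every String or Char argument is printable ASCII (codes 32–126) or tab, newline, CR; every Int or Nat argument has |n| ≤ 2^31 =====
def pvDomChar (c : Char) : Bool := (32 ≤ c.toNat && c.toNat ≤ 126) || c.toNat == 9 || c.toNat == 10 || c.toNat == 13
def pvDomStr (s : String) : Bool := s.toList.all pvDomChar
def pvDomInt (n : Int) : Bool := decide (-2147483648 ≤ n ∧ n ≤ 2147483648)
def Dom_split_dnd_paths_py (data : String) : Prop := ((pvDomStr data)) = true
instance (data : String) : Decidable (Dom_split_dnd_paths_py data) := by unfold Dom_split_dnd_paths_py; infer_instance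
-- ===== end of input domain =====

-- B replaces A's char-by-char state machine by a position-based tokenizer
-- (find('}') for brace groups, one bounded scan per bare word); objective:
-- alternative decomposition, same asymptotic cost; B differs from A exactly
-- on the D_ region stated below.

-- ===== PORT A =====
-- state: (res, cur, in_brace)
def pvStepA (st : List String × List Char × Bool) (ch : Char) : List String × List Char × Bool :=
  let res := st.1; let cur := st.2.1; let inb := st.2.2
  if ch = '{' then (res, [], true)
  else if ch = '}' then (res ++ [String.ofList cur], [], false)
  else if ch = ' ' ∧ inb = false then
    (if cur ≠ [] then (res ++ [String.ofList cur], [], inb) else (res, cur, inb))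
  else (res, cur ++ [ch], inb)

def split_dnd_paths_py (data : String) : List String :=
  let st := data.toList.foldl pvStepA ([], [], false)
  let res := if st.2.1 ≠ [] then st.1 ++ [String.ofList st.2.1] else st.1
  res.filterMap (fun p => let s := PySem.Str.strip p; if s = "" then none else some s)

-- ===== PORT B =====
def pvNotDelim (c : Char) : Bool := !(c = ' ' || c = '{' || c = '}')
def pvNotClose (c : Char) : Bool := !(c = '}')

-- the while-loop of Source B: brace group = text up to the next '}' (or the end),
-- bare word = maximal run of non-space/non-brace characters
def pvScanB : List Char → List (List Char)
  | [] => []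
  | c :: rest =>
    if c = '{' then
      rest.takeWhile pvNotClose :: pvScanB (rest.dropWhile pvNotClose).tail
    else if c = ' ' ∨ c = '}' then pvScanB rest
    else (c :: rest.takeWhile pvNotDelim) :: pvScanB (rest.dropWhile pvNotDelim)
  termination_by cs => cs.length
  decreasing_by
  all_goals simp only [List.length_cons, List.length_tail]
  all_goals first
    | (have := List.length_dropWhile_le pvNotClose rest; omega)
    | (have := List.length_dropWhile_le pvNotDelim rest; omega)

def split_dnd_paths_py_alt (data : String) : List String :=
  let res := (pvScanB data.toList).map (fun t => String.ofList t)
  res.filterMap (fun p => let s := PySem.Str.strip p; if s = "" then none else some s)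

-- ===== PRECONDITION & SPEC =====
-- an opening brace is "non-fresh" when a visible (non-whitespace) character
-- precedes it with no separator (space or brace) in between, or an earlier
-- opening brace precedes it with no closing brace in between.  One linear
-- scan over the input decides this: the
-- state carries (found, visible-char pending in the current run, inside an
-- unclosed brace); it is a pattern test on the input and computes no output.
def pvDStep (st : Bool × Bool × Bool) (ch : Char) : Bool × Bool × Bool :=
  match st with
  | (found, pend, opn) =>
    if ch = '{' then (found || pend || opn, false, true)
    else if ch = '}' then (found, false, false)
    else if ch = ' ' then (found, false, opn)
    else (found, pend || !(PySem.Chars.isspace ch), opn)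

def pvBad (cs : List Char) : Bool := (cs.foldl pvDStep (false, false, false)).1

-- On inputs with a non-fresh opening brace (glued to preceding visible text, or
-- occurring again inside an unclosed brace group) A silently discards the
-- buffered text before it; B keeps it, the intended reading of drag-and-drop data.
def D_split_dnd_paths_py (data : String) : Prop := pvBad data.toList = true
instance (data : String) : Decidable (D_split_dnd_paths_py data) := by unfold D_split_dnd_paths_py; infer_instance

def Spec_split_dnd_paths_py (data : String) (out : List String) : Prop :=
  ¬ D_split_dnd_paths_py data → out = split_dnd_paths_py_alt data
instance (data : String) (out : List String) : Decidable (Spec_split_dnd_paths_py data out) := by unfold Spec_split_dnd_paths_py; infer_instance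

def pvDiffWitness_split_dnd_paths_py : String := "a{b}"
def pvDiffWitnessOut_split_dnd_paths_py : (List String) × (List String) := (["b"], ["a", "b"])

-- ===== CLAIM (what is proved, stated in full; the proofs are below) =====
def Claim_unchanged_split_dnd_paths_py : Prop :=
  ∀ (data : String), Dom_split_dnd_paths_py data → Spec_split_dnd_paths_py data (split_dnd_paths_py data)
def Claim_changed_split_dnd_paths_py : Prop :=
  Dom_split_dnd_paths_py (pvDiffWitness_split_dnd_paths_py) ∧
  D_split_dnd_paths_py (pvDiffWitness_split_dnd_paths_py) ∧
  split_dnd_paths_py (pvDiffWitness_split_dnd_paths_py) = pvDiffWitnessOut_split_dnd_paths_py.1 ∧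
  split_dnd_paths_py_alt (pvDiffWitness_split_dnd_paths_py) = pvDiffWitnessOut_split_dnd_paths_py.2 ∧
  pvDiffWitnessOut_split_dnd_paths_py.1 ≠ pvDiffWitnessOut_split_dnd_paths_py.2

-- ===== LEMMAS AND PROOFS =====

-- A's machine at the List Char level
def pvF : List Char → List Char → Bool → List (List Char)
  | [], cur, _ => if cur ≠ [] then [cur] else []
  | c :: r, cur, inb =>
    if c = '{' then pvF r [] true
    else if c = '}' then cur :: pvF r [] false
    else if c = ' ' ∧ inb = false then
      (if cur ≠ [] then cur :: pvF r [] inb else pvF r cur inb)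
    else pvF r (cur ++ [c]) inb

-- final strip-and-filter, at the List Char level
def pvClean (l : List (List Char)) : List String :=
  l.filterMap (fun t => let s := PySem.Chars.strip t; if s = [] then none else some (String.ofList s))

theorem pvF_eq_foldl : ∀ (cs : List Char) (res : List (List Char)) (cur : List Char) (inb : Bool),
    (let st := cs.foldl pvStepA (res.map String.ofList, cur, inb)
     if st.2.1 ≠ [] then st.1 ++ [String.ofList st.2.1] else st.1)
    = (res ++ pvF cs cur inb).map String.ofList := by
  intro cs
  induction cs with
  | nil =>
    intro res cur inb
    simp only [List.foldl_nil, pvF]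
    split_ifs <;> simp
  | cons c r ih =>
    intro res cur inb
    simp only [List.foldl_cons]
    by_cases h1 : c = '{'
    · simpa [pvStepA, pvF, h1] using ih res [] true
    · by_cases h2 : c = '}'
      · have := ih (res ++ [cur]) [] false
        simp only [List.map_append, List.map_cons, List.map_nil, List.append_assoc] at this ⊢
        simpa [pvStepA, pvF, h1, h2] using this
      · by_cases h3 : c = ' ' ∧ inb = false
        · by_cases h4 : cur = []
          · simpa [pvStepA, pvF, h1, h2, h3, h4] using ih res cur inb
          · have := ih (res ++ [cur]) [] inb
            simp only [List.map_append, List.map_cons, List.map_nil, List.append_assoc] at this ⊢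
            simpa [pvStepA, pvF, h1, h2, h3, h4] using this
        · simpa [pvStepA, pvF, h1, h2, h3] using ih res (cur ++ [c]) inb

theorem pvClean_map (l : List (List Char)) :
    (l.map String.ofList).filterMap (fun p => let s := PySem.Str.strip p; if s = "" then none else some s)
    = pvClean l := by
  induction l with
  | nil => rfl
  | cons t l ih =>
    have hs : PySem.Str.strip (String.ofList t) = String.ofList (PySem.Chars.strip t) := by
      apply String.toList_inj.mp
      simp [PySem.Str.toList_strip]
    have he : (String.ofList (PySem.Chars.strip t) = "") ↔ PySem.Chars.strip t = [] := by
      constructor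
      · intro h
        have := congrArg String.toList h
        simpa using this
      · intro h; simp [h]
    simp only [List.map_cons, List.filterMap_cons, pvClean, hs]
    by_cases h : PySem.Chars.strip t = []
    · simp [h, pvClean] at ih ⊢; exact ih
    · simp [h, pvClean] at ih ⊢; exact ih

theorem pvClean_cons (t : List Char) (l : List (List Char)) :
    pvClean (t :: l) =
      (if PySem.Chars.strip t = [] then [] else [String.ofList (PySem.Chars.strip t)]) ++ pvClean l := by
  simp only [pvClean, List.filterMap_cons]
  split_ifs <;> simp

theorem pvClean_empty_cons (l : List (List Char)) : pvClean ([] :: l) = pvClean l := by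
  rw [pvClean_cons]; rfl

def pvWordChar (c : Char) : Bool := decide (c ∉ [' ', '{', '}'])
def pvNotRBrace (c : Char) : Bool := decide (c ≠ '}')

def pvTrig (c : Char) (r : List Char) : Bool :=
  if c = '{' then decide ('{' ∈ r.takeWhile pvNotRBrace)
  else if PySem.Chars.isspace c || c = '}' then false
  else (r.dropWhile pvWordChar).head? == some '{'

-- suffix-scan form of pvBad, used by the proofs
def pvBadR : List Char → Bool
  | [] => false
  | c :: r => pvTrig c r || pvBadR r

theorem pvFoldD : ∀ (cs : List Char) (found pend opn : Bool),
    (cs.foldl pvDStep (found, pend, opn)).1 =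
      (found || (pend && ((cs.dropWhile pvWordChar).head? == some '{'))
             || (opn && decide ('{' ∈ cs.takeWhile pvNotRBrace))
             || pvBadR cs) := by
  intro cs
  induction cs with
  | nil => intro found pend opn; simp [pvBadR]
  | cons c r ih =>
    intro found pend opn
    by_cases h1 : c = '{'
    · subst h1
      rw [List.foldl_cons, show pvDStep (found, pend, opn) '{' = (found || pend || opn, false, true) from rfl,
          ih]
      rw [List.dropWhile_cons_of_neg (by simp [pvWordChar]),
          List.takeWhile_cons_of_pos (by simp [pvNotRBrace])]
      have ht : pvTrig '{' r = decide ('{' ∈ r.takeWhile pvNotRBrace) := by simp [pvTrig]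
      rw [pvBadR, ht]
      simp only [List.head?_cons, List.mem_cons, true_or, decide_true]
      cases found <;> cases pend <;> cases opn <;> simp
    · by_cases h2 : c = '}'
      · subst h2
        rw [List.foldl_cons, show pvDStep (found, pend, opn) '}' = (found, false, false) from rfl, ih]
        rw [List.dropWhile_cons_of_neg (by simp [pvWordChar]),
            List.takeWhile_cons_of_neg (by simp [pvNotRBrace])]
        have ht : pvTrig '}' r = false := by simp [pvTrig]
        rw [pvBadR, ht]
        simp
      · by_cases h3 : c = ' '
        · subst h3
          rw [List.foldl_cons, show pvDStep (found, pend, opn) ' ' = (found, false, opn) from rfl, ih]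
          rw [List.dropWhile_cons_of_neg (by simp [pvWordChar]),
              List.takeWhile_cons_of_pos (by simp [pvNotRBrace])]
          have ht : pvTrig ' ' r = false := by
            simp [pvTrig, show PySem.Chars.isspace ' ' = true from by decide]
          rw [pvBadR, ht]
          have hm : decide (('{' : Char) ∈ ' ' :: r.takeWhile pvNotRBrace)
              = decide ('{' ∈ r.takeWhile pvNotRBrace) := by simp
          rw [hm]
          simp
        · have hstep : pvDStep (found, pend, opn) c =
              (found, pend || !(PySem.Chars.isspace c), opn) := by
            simp [pvDStep, h1, h2, h3]
          rw [List.foldl_cons, hstep, ih,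
              List.dropWhile_cons_of_pos (by simp [pvWordChar, h1, h2, h3]),
              List.takeWhile_cons_of_pos (by simp [pvNotRBrace, h2])]
          have hne : ('{' : Char) ≠ c := fun h => h1 h.symm
          have hm : decide (('{' : Char) ∈ c :: r.takeWhile pvNotRBrace)
              = decide ('{' ∈ r.takeWhile pvNotRBrace) := by simp [List.mem_cons, hne]
          rw [hm]
          have htr : pvTrig c r =
              (!(PySem.Chars.isspace c) && ((r.dropWhile pvWordChar).head? == some '{')) := by
            by_cases hsp : PySem.Chars.isspace c = true
            · simp [pvTrig, h1, hsp]
            · rw [Bool.not_eq_true] at hsp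
              simp [pvTrig, h1, h2, hsp]
          rw [pvBadR, htr]
          cases pend <;> cases opn <;> cases found <;>
            cases hsp : PySem.Chars.isspace c <;>
            cases hh : ((r.dropWhile pvWordChar).head? == some '{') <;> simp

theorem pvBad_eq (cs : List Char) : pvBad cs = pvBadR cs := by
  rw [pvBad, pvFoldD]; simp

-- pvBad is monotone: a false head stays false on the tail
theorem pvBadR_tail {c : Char} {r : List Char} (h : pvBadR (c :: r) = false) :
    pvTrig c r = false ∧ pvBadR r = false := by
  simpa [pvBadR, Bool.or_eq_false_iff] using h

theorem pvWordChar_eq : pvWordChar = pvNotDelim := by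
  funext c
  by_cases h1 : c = ' ' <;> by_cases h2 : c = '{' <;> by_cases h3 : c = '}' <;>
    simp [pvWordChar, pvNotDelim, h1, h2, h3]
theorem pvNotRBrace_eq : pvNotRBrace = pvNotClose := by
  funext c
  by_cases h : c = '}' <;> simp [pvNotRBrace, pvNotClose, h]

-- pvBad is false on every suffix of a pvBad-false list
theorem pvBadR_suffix : ∀ {l1 l2 : List Char}, l2 <:+ l1 → pvBadR l1 = false → pvBadR l2 = false := by
  intro l1
  induction l1 with
  | nil =>
    intro l2 h hb
    rw [List.suffix_nil.mp h]; exact hb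
  | cons c r ih =>
    intro l2 h hb
    rcases List.suffix_cons_iff.mp h with rfl | h2
    · exact hb
    · exact ih h2 (pvBadR_tail hb).2

-- a whitespace-only token strips to []
theorem pvStrip_ws {t : List Char} (h : ∀ x ∈ t, PySem.Chars.isspace x = true) :
    PySem.Chars.strip t = [] := by
  simp [PySem.Chars.strip, PySem.Chars.lstrip, PySem.Chars.rstrip]
  exact fun x hx => h x ((List.dropWhile_sublist _).subset hx)

-- under ¬pvBadR (suffix form), a bare-word run that hits a '{' is all whitespace
theorem pvRunWS : ∀ (r : List Char) (c : Char), pvBadR (c :: r) = false →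
    pvNotDelim c = true → (r.dropWhile pvNotDelim).head? = some '{' →
    ∀ x ∈ c :: r.takeWhile pvNotDelim, PySem.Chars.isspace x = true := by
  intro r
  induction r with
  | nil =>
    intro c hb hc hh
    simp at hh
  | cons x r' ih =>
    intro c hb hc hh
    obtain ⟨htrig, hbr⟩ := pvBadR_tail hb
    have hcws : PySem.Chars.isspace c = true := by
      by_contra hws
      have hcb : c ≠ '{' := by
        rintro rfl; simp [pvNotDelim] at hc
      have : pvTrig c (x :: r') = true := by
        have hcc : c ≠ '}' := by rintro rfl; simp [pvNotDelim] at hc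
        simp only [pvTrig, if_neg hcb, Bool.not_eq_true] at *
        rw [if_neg (by simp [hcc, Bool.not_eq_true] at *; simpa using hws)]
        simp [pvWordChar_eq, hh]
      rw [this] at htrig; exact absurd htrig (by simp)
    by_cases hx : pvNotDelim x = true
    · have hdw : (r'.dropWhile pvNotDelim).head? = some '{' := by
        rwa [List.dropWhile_cons_of_pos hx] at hh
      have := ih x hbr hx hdw
      intro y hy
      rw [List.takeWhile_cons_of_pos hx] at hy
      rcases List.mem_cons.mp hy with rfl | hy
      · exact hcws
      · exact this y hy
    · intro y hy
      rw [List.takeWhile_cons_of_neg hx] at hy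
      rcases List.mem_cons.mp hy with rfl | hy
      · exact hcws
      · simp at hy

-- A in a brace group with no inner '{', up to the first '}' (or end of input)
theorem pvF_brace : ∀ (r acc : List Char), '{' ∉ r.takeWhile pvNotClose →
    pvF r acc true =
      (if (r.dropWhile pvNotClose).isEmpty
       then (if acc ++ r.takeWhile pvNotClose ≠ [] then [acc ++ r.takeWhile pvNotClose] else [])
       else (acc ++ r.takeWhile pvNotClose) :: pvF (r.dropWhile pvNotClose).tail [] false) := by
  intro r
  induction r with
  | nil =>
    intro acc _
    simp [pvF]
  | cons c r ih =>
    intro acc h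
    by_cases hc : c = '}'
    · subst hc
      rw [List.takeWhile_cons_of_neg (by simp [pvNotClose]),
          List.dropWhile_cons_of_neg (by simp [pvNotClose])]
      simp [pvF]
    · have hpos : pvNotClose c = true := by simp [pvNotClose, hc]
      rw [List.takeWhile_cons_of_pos hpos] at h
      have hcb : c ≠ '{' := by rintro rfl; exact h (List.mem_cons_self ..)
      have h' : '{' ∉ r.takeWhile pvNotClose := fun hm => h (List.mem_cons_of_mem _ hm)
      have hst : pvF (c :: r) acc true = pvF r (acc ++ [c]) true := by
        simp [pvF, hcb, hc]
      rw [hst, ih (acc ++ [c]) h',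
          List.takeWhile_cons_of_pos hpos, List.dropWhile_cons_of_pos hpos]
      simp

-- A inside a plain run
theorem pvF_run : ∀ (r acc : List Char),
    pvF r acc false = pvF (r.dropWhile pvNotDelim) (acc ++ r.takeWhile pvNotDelim) false := by
  intro r
  induction r with
  | nil => intro acc; simp
  | cons c r ih =>
    intro acc
    by_cases h : pvNotDelim c = true
    · have h1 : c ≠ '{' := by rintro rfl; simp [pvNotDelim] at h
      have h2 : c ≠ '}' := by rintro rfl; simp [pvNotDelim] at h
      have h3 : c ≠ ' ' := by rintro rfl; simp [pvNotDelim] at h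
      rw [List.dropWhile_cons_of_pos h, List.takeWhile_cons_of_pos h]
      have hst : pvF (c :: r) acc false = pvF r (acc ++ [c]) false := by
        simp [pvF, h1, h2, h3]
      rw [hst, ih]
      simp
    · rw [List.dropWhile_cons_of_neg h, List.takeWhile_cons_of_neg h]
      simp

theorem pvMain : ∀ (cs : List Char), pvBadR cs = false →
    pvClean (pvF cs [] false) = pvClean (pvScanB cs) := by
  have key : ∀ (n : ℕ) (cs : List Char), cs.length ≤ n → pvBadR cs = false →
      pvClean (pvF cs [] false) = pvClean (pvScanB cs) := by
    intro n
    induction n with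
    | zero =>
      intro cs h _
      have : cs = [] := List.eq_nil_of_length_eq_zero (Nat.le_zero.mp h)
      subst this
      rw [pvScanB]; rfl
    | succ n ih =>
      intro cs hlen hb
      match cs with
      | [] => rw [pvScanB]; rfl
      | c :: r =>
        simp only [List.length_cons, Nat.succ_le_succ_iff] at hlen
        obtain ⟨htrig, hbr⟩ := pvBadR_tail hb
        by_cases h1 : c = '{'
        · subst h1
          have hno : '{' ∉ r.takeWhile pvNotClose := by
            simpa [pvTrig, pvNotRBrace_eq] using htrig
          have hA : pvF ('{' :: r) [] false = pvF r [] true := by simp [pvF]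
          have hB : pvScanB ('{' :: r) =
              r.takeWhile pvNotClose :: pvScanB (r.dropWhile pvNotClose).tail := by
            rw [pvScanB]; simp
          rw [hA, hB, pvF_brace r [] hno]
          simp only [List.nil_append]
          have hdlen : (r.dropWhile pvNotClose).length ≤ r.length :=
            List.length_dropWhile_le _ _
          by_cases hp : (r.dropWhile pvNotClose).isEmpty
          · have hnil : r.dropWhile pvNotClose = [] := by simpa [List.isEmpty_iff] using hp
            rw [if_pos hp, hnil]
            simp only [List.tail_nil]
            by_cases ht : r.takeWhile pvNotClose = []
            · rw [if_neg (by simpa using ht), ht, pvClean_empty_cons,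
                  show pvScanB [] = [] from by rw [pvScanB]]
            · rw [if_pos (by simpa using ht), show pvScanB [] = [] from by rw [pvScanB]]
          · rw [if_neg hp, pvClean_cons, pvClean_cons]
            have htlen : (r.dropWhile pvNotClose).tail.length ≤ n := by
              have h' : (r.dropWhile pvNotClose).tail.length = (r.dropWhile pvNotClose).length - 1 :=
                List.length_tail
              omega
            have hbt : pvBadR (r.dropWhile pvNotClose).tail = false :=
              pvBadR_suffix ((List.tail_suffix _).trans (List.dropWhile_suffix _)) hbr
            rw [ih _ htlen hbt]
        · by_cases h2 : c = '}' ∨ c = ' '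
          · rcases h2 with h2 | h2
            · subst h2
              have hB : pvScanB ('}' :: r) = pvScanB r := by rw [pvScanB]; simp
              have hA : pvF ('}' :: r) [] false = [] :: pvF r [] false := by simp [pvF]
              rw [hA, hB, pvClean_empty_cons]; exact ih r hlen hbr
            · subst h2
              have hB : pvScanB (' ' :: r) = pvScanB r := by rw [pvScanB]; simp
              have hA : pvF (' ' :: r) [] false = pvF r [] false := by simp [pvF]
              rw [hA, hB]; exact ih r hlen hbr
          · rw [not_or] at h2
            obtain ⟨h2, h3⟩ := h2
            have hcw : pvNotDelim c = true := by simp [pvNotDelim, h1, h2, h3]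
            have hA : pvF (c :: r) [] false = pvF r [c] false := by
              simp [pvF, h1, h2, h3]
            have hB : pvScanB (c :: r) =
                (c :: r.takeWhile pvNotDelim) :: pvScanB (r.dropWhile pvNotDelim) := by
              rw [pvScanB]; simp [h1, h2, h3]
            have hrlen : (r.dropWhile pvNotDelim).length ≤ r.length :=
              List.length_dropWhile_le _ _
            rw [hA, pvF_run r [c], hB]
            match hre : r.dropWhile pvNotDelim with
            | [] =>
              show pvClean (pvF [] ([c] ++ r.takeWhile pvNotDelim) false) = _
              rw [pvClean_cons]
              simp [pvF, pvScanB, pvClean_cons]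
            | d :: r2 =>
              have hd : pvNotDelim d = false := by
                have hne : r.dropWhile pvNotDelim ≠ [] := by rw [hre]; simp
                have hh := List.head_dropWhile_not pvNotDelim hne
                simp only [hre, List.head_cons] at hh
                exact hh
              have hbrest : pvBadR (d :: r2) = false := by
                rw [← hre]; exact pvBadR_suffix (List.dropWhile_suffix _) hbr
              by_cases hdb : d = '{'
              · subst hdb
                have hws : ∀ x ∈ c :: r.takeWhile pvNotDelim, PySem.Chars.isspace x = true := by
                  refine pvRunWS r c hb hcw ?_
                  rw [hre]; rfl
                have hstrip : PySem.Chars.strip (c :: r.takeWhile pvNotDelim) = [] :=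
                  pvStrip_ws hws
                have hFd : pvF ('{' :: r2) ([c] ++ r.takeWhile pvNotDelim) false =
                    pvF ('{' :: r2) [] false := by simp [pvF]
                rw [hFd, pvClean_cons, hstrip, if_pos rfl, List.nil_append]
                exact ih ('{' :: r2) (by simp only [List.length_cons]; rw [hre] at hrlen; simp only [List.length_cons] at hrlen; omega) hbrest
              · have hds' : d = '}' ∨ d = ' ' := by
                  by_cases hds : d = '}'
                  · exact Or.inl hds
                  · refine Or.inr ?_
                    by_contra hd2
                    simp [pvNotDelim, hdb, hds, hd2] at hd
                have hFd : pvF (d :: r2) ([c] ++ r.takeWhile pvNotDelim) false =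
                    ([c] ++ r.takeWhile pvNotDelim) :: pvF r2 [] false := by
                  rcases hds' with hds | hds <;> simp [pvF, hds]
                have hSd : pvScanB (d :: r2) = pvScanB r2 := by
                  rw [pvScanB]; rcases hds' with hds | hds <;> simp [hds]
                have hbr2 : pvBadR r2 = false := (pvBadR_tail hbrest).2
                rw [hFd, hSd, pvClean_cons, pvClean_cons]
                simp only [List.cons_append, List.nil_append]
                have : r2.length ≤ n := by
                  rw [hre] at hrlen; simp only [List.length_cons] at hrlen; omega
                rw [ih r2 this hbr2]
  intro cs; exact key cs.length cs le_rfl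

-- ===== VERDICT (by name: the statements are the Claim_ definitions above) =====
theorem split_dnd_paths_py_spec : Claim_unchanged_split_dnd_paths_py := by
  intro data _ hnd
  show _ = _
  unfold split_dnd_paths_py split_dnd_paths_py_alt
  have h := pvF_eq_foldl data.toList [] [] false
  simp only [List.map_nil, List.nil_append] at h
  have hb : pvBadR data.toList = false := by
    unfold D_split_dnd_paths_py at hnd
    rw [← pvBad_eq]
    simpa using hnd
  simp only [h, pvClean_map, pvMain _ hb]

theorem split_dnd_paths_py_changed : Claim_changed_split_dnd_paths_py := by
  unfold Claim_changed_split_dnd_paths_py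
  refine ⟨by decide, by decide, by decide, ?_, by decide⟩
  show split_dnd_paths_py_alt pvDiffWitness_split_dnd_paths_py = _
  unfold split_dnd_paths_py_alt
  have h : pvDiffWitness_split_dnd_paths_py.toList = ['a', '{', 'b', '}'] := rfl
  rw [h]
  simp [pvScanB, pvNotDelim, pvNotClose, List.takeWhile, List.dropWhile]
  decide
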